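-- pv_equiv track=rewrite | github.com/SupporterDog/Code_Study_Reports | basic_programming/hw3/202011047_hw3.2.py | image_to_str
-- ===== SOURCE A (Python) =====
-- def image_to_str(umcompressed_img):                                 #조건에 맞느 함수 설정
--     list = []                                                       #빈 리스트 생성
--     for i in range(len(umcompressed_img)):                          #i를 또 인수만큼 돌림
--         inlist = []                                                 #새로운 빈 리스트 생성
--         for j in range(len(umcompressed_img[i])):                   #string_to_image의 함수와 거의 동일하게 0을 받으면 ' ', 1을 받으면 '*'을 inlist에 넣어서 list에 다시 넣도록 함.(23~28)
--             if umcompressed_img[i][j] == 0 :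
--                 inlist.append(' ')
--             if umcompressed_img[i][j] == 1:
--                 inlist.append('*')
--         list.append(inlist)
--
--     newlist=[]                                                      #newlist를 만듦
--     for k in range(len(list)):                                      #list의 인수 개수만큼 돌림
--         str=""                                                      #string 빈 것을 만듦
--         for q in list[k]:                                           #list의 k번째 인수 중의 인수들에 인해서
--             str += q                                                #빈 string에 q를 넣음
--         newlist.append(str)                                         #newlist에 str를 넣음. 이를 통해 리스트처럼 나오는 것이 아닌, 리스트가 string으로 변경되어서 이미지화됨.
--     return newlist
-- ===== SOURCE B (Python) =====
-- def image_to_str(umcompressed_img):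
--     def render(row):
--         if not row:
--             return ""
--         rest = render(row[1:])
--         if row[0] == 0:
--             return " " + rest
--         if row[0] == 1:
--             return "*" + rest
--         return rest
--
--     if not umcompressed_img:
--         return []
--     return [render(umcompressed_img[0])] + image_to_str(umcompressed_img[1:])
-- ===== Notes on version B (the rewrite author's own statement) =====
-- stated objective: alternative
-- what changed: B is structurally recursive on both the row list and each row, building every output string back-to-front from the recursive tail (cons/prepend), with no index loops, no intermediate char-matrix and no separate concatenation pass.
import Mathlib
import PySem

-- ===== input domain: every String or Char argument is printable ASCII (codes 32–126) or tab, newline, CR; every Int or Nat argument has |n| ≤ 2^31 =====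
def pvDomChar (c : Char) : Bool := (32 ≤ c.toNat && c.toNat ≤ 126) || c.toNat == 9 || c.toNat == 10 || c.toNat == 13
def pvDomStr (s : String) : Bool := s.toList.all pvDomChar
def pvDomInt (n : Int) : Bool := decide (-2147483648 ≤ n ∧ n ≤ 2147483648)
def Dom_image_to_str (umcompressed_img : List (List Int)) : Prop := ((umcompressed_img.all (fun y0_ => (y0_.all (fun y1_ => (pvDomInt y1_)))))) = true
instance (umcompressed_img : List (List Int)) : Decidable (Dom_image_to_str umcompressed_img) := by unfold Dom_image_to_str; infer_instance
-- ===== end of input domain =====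

-- ===== PORT A =====
-- B replaces A's two staged index loops with structural recursion building strings back-to-front (objective: alternative).
-- A's inner loop: two separate ifs appending ' ' / '*' to inlist
def pyRowA (row : List Int) : List String :=
  row.foldl (fun inlist x =>
    let inlist1 := if x = 0 then inlist ++ [" "] else inlist
    if x = 1 then inlist1 ++ ["*"] else inlist1) []

-- A's second loop: str = ""; for q in list[k]: str += q
def pyCatA (l : List String) : String :=
  l.foldl (fun s q => s ++ q) ""

def image_to_str (umcompressed_img : List (List Int)) : List String :=
  let list := umcompressed_img.map pyRowA
  list.map pyCatA

-- ===== PORT B =====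
-- render(row): recursion on the row, prepending ' '/'*' to the recursively rendered tail
def renderB : List Int → String
  | [] => ""
  | x :: t =>
    let rest := renderB t
    if x = 0 then " " ++ rest
    else if x = 1 then "*" ++ rest
    else rest

def image_to_str_alt : List (List Int) → List String
  | [] => []
  | row :: t => renderB row :: image_to_str_alt t

-- ===== PRECONDITION & SPEC =====
def Spec_image_to_str (umcompressed_img : List (List Int)) (out : List String) : Prop := out = image_to_str_alt umcompressed_img
instance (umcompressed_img : List (List Int)) (out : List String) : Decidable (Spec_image_to_str umcompressed_img out) := by unfold Spec_image_to_str; infer_instance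

-- ===== CLAIM (what is proved, stated in full; the proofs are below) =====
def Claim_equal_image_to_str : Prop := ∀ (umcompressed_img : List (List Int)), Dom_image_to_str umcompressed_img → Spec_image_to_str umcompressed_img (image_to_str umcompressed_img)

-- ===== LEMMAS AND PROOFS =====
-- chars contributed by one cell
def cellChars (x : Int) : List Char :=
  if x = 0 then [' '] else if x = 1 then ['*'] else []

theorem renderB_toList (row : List Int) :
    (renderB row).toList = row.flatMap cellChars := by
  induction row with
  | nil => rfl
  | cons x t ih =>
    simp only [renderB]
    split_ifs with h0 h1 <;> simp_all [cellChars]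

-- A's per-cell step appends exactly the (possibly empty) segment gCell x
def gCell (x : Int) : List String :=
  (if x = 0 then [" "] else []) ++ (if x = 1 then ["*"] else [])

theorem rowA_eq_flatMap (row : List Int) : pyRowA row = row.flatMap gCell := by
  have h : pyRowA row = row.foldl (fun acc x => acc ++ gCell x) [] := by
    unfold pyRowA
    congr 1
    funext inlist x
    simp only [gCell]
    split_ifs with h0 h1 h1 <;> simp_all
  rw [h, PySem.List.foldl_append_eq_flatMap]
  simp

theorem strfold_toList (l : List String) (s : String) :
    (l.foldl (fun a q => a ++ q) s).toList = s.toList ++ (l.map String.toList).flatten := by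
  induction l generalizing s with
  | nil => simp
  | cons q t ih => simp [ih, String.toList_append]

theorem row_eq (row : List Int) : pyCatA (pyRowA row) = renderB row := by
  apply String.toList_injective
  rw [pyCatA, strfold_toList, rowA_eq_flatMap, renderB_toList]
  induction row with
  | nil => rfl
  | cons x t ih =>
    simp only [List.flatMap_cons, List.map_append, List.flatten_append, gCell, cellChars]
    split_ifs with h0 h1 <;> simp_all

theorem alt_eq_map (img : List (List Int)) :
    image_to_str_alt img = img.map renderB := by
  induction img with
  | nil => rfl
  | cons r t ih => simp [image_to_str_alt, ih]

-- ===== VERDICT (by name: the statement is the Claim_ definition above) =====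
theorem image_to_str_spec : Claim_equal_image_to_str := by
  intro img _
  unfold Spec_image_to_str image_to_str
  rw [alt_eq_map]
  simp only [List.map_map]
  exact List.map_congr_left (fun row _ => row_eq row)
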